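-- pv_equiv track=rewrite | github.com/ckadelka/MultistateGRN | multistate_toolbox.py | vec_bin2multi
-- ===== SOURCE A (Python) =====
-- def vec_bin2multi(vec_b, B):
--     conversion = [ 0 for _ in range(len(B) + 1) ]
--     for i, base in enumerate(B):
--         conversion[i + 1] = conversion[i] + base - 1
--     vec_ms = [ 0 for _ in range(len(B)) ]
--     for i in range(len(B)):
--         value = 0
--         break_flag = False
--         for group_rev_idx in range(conversion[i], conversion[i + 1]):
--             idx = conversion[i + 1] - group_rev_idx - 1 + conversion[i]
--             if vec_b[idx] > 0:
--                 if break_flag: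
--                     return None
--                 value += 1
--             else:
--                 break_flag = True
--         vec_ms[i] = value
--     return vec_ms
-- ===== SOURCE B (Python) =====
-- def vec_bin2multi(vec_b, B):
--     vec_ms = []
--     pos = 0
--     for base in B:
--         size = base - 1
--         bits = [1 if vec_b[pos + j] > 0 else 0 for j in range(size)]
--         pos += size
--         if any(a > b for a, b in zip(bits, bits[1:])):
--             return None
--         vec_ms.append(sum(bits))
--     return vec_ms
-- ===== Notes on version B (the rewrite author's own statement) =====
-- stated objective: simpler
-- what changed: Replaces A's precomputed prefix-sum conversion table and reversed inner scan with a break flag by a single running position walked forward over vec_b, building each group's bit list and rejecting it if a 1 is immediately followed by a 0 (forward zeros-then-ones check), the group value being the bit sum.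
-- outside the precondition, e.g. on vec_bin2multi([1, 0], [3, 5]): A returns None, B returns None
import Mathlib
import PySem

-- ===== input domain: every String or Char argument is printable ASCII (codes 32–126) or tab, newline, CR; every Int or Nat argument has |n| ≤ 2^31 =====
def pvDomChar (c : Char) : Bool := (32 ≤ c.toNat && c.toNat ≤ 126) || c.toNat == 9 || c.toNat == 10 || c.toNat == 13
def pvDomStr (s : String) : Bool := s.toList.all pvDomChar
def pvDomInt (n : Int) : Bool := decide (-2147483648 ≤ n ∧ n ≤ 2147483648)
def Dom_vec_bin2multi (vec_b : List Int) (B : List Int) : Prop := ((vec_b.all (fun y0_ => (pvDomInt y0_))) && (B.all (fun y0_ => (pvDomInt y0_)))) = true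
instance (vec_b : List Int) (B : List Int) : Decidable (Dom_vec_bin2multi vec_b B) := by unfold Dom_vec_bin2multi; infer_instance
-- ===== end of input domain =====

-- B replaces A's prefix-sum conversion table and reversed break-flag scan by a forward walk
-- with a running position, per-group bit lists, an adjacent 1-then-0 validity check and a bit sum
-- (objective: simpler; same asymptotic cost).


-- ===== PORT A =====
-- conversion = [0]*(len(B)+1); for i, base in enumerate(B): conversion[i+1] = conversion[i] + base - 1
-- (built by appending each newly assigned entry; the running value is conversion[i])
def pvConvLoop (Bs : List Int) (acc : List Int) (c : Int) : List Int :=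
  match Bs with
  | [] => acc
  | b :: rest => pvConvLoop rest (acc ++ [c + b - 1]) (c + b - 1)

-- inner loop over group_rev_idx with state (value, break_flag); none = 'return None' or IndexError
def pvInnerA (vec_b : List Int) (c0 c1 : Int) (gs : List Int) (value : Int) (flag : Bool) :
    Option (Int × Bool) :=
  match gs with
  | [] => some (value, flag)
  | g :: rest =>
    match PySem.List.pyGet? vec_b (c1 - g - 1 + c0) with
    | none => none   -- IndexError (outside Pre_)
    | some v =>
      if v > 0 then
        if flag then none else pvInnerA vec_b c0 c1 rest (value + 1) flag
      else pvInnerA vec_b c0 c1 rest value true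

-- for i in range(len(B)): … vec_ms[i] = value  (vec_ms built in index order)
def pvOuterA (vec_b conversion : List Int) (is_ : List Nat) (acc : List Int) : Option (List Int) :=
  match is_ with
  | [] => some acc
  | i :: rest =>
    let c0 := conversion.getD i 0
    let c1 := conversion.getD (i + 1) 0
    match pvInnerA vec_b c0 c1 (PySem.List.pyRange c0 c1 1) 0 false with
    | none => none
    | some (value, _) => pvOuterA vec_b conversion rest (acc ++ [value])

def vec_bin2multi (vec_b : List Int) (B : List Int) : Option (List Int) :=
  pvOuterA vec_b (pvConvLoop B [0] 0) (List.range B.length) []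

-- ===== PORT B =====
-- bits = [1 if vec_b[pos + j] > 0 else 0 for j in range(size)]; none = IndexError
def pvBits (vec_b : List Int) (pos : Int) (js : List Int) : Option (List Int) :=
  match js with
  | [] => some []
  | j :: rest =>
    match PySem.List.pyGet? vec_b (pos + j) with
    | none => none
    | some v =>
      match pvBits vec_b pos rest with
      | none => none
      | some bs => some ((if v > 0 then (1 : Int) else 0) :: bs)

-- any(a > b for a, b in zip(bits, bits[1:]))
def pvDrop10 (bits : List Int) : Bool :=
  match bits with
  | a :: b :: rest => (decide (a > b)) || pvDrop10 (b :: rest)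
  | _ => false

def pvOuterB (vec_b : List Int) (Bs : List Int) (pos : Int) (acc : List Int) : Option (List Int) :=
  match Bs with
  | [] => some acc
  | base :: rest =>
    let size := base - 1
    match pvBits vec_b pos (PySem.List.pyRange 0 size 1) with
    | none => none
    | some bits =>
      if pvDrop10 bits then none
      else pvOuterB vec_b rest (pos + size) (acc ++ [bits.sum])

def vec_bin2multi_alt (vec_b : List Int) (B : List Int) : Option (List Int) :=
  pvOuterB vec_b B 0 []

-- ===== PRECONDITION & SPEC =====
def pvPrefix (B : List Int) (i : Nat) : Int := ((B.take i).map (fun b => b - 1)).sum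

-- Pre_ excludes inputs where some non-empty group's index block falls outside Python's valid
-- index range [-len(vec_b), len(vec_b)); on almost all of these A raises IndexError, but A can
-- return None early (an invalid earlier group) before reaching the out-of-range block, where B
-- raises or also returns None.
def Pre_vec_bin2multi (vec_b : List Int) (B : List Int) : Prop :=
  ∀ i < B.length, 2 ≤ B.getD i 0 →
    -(vec_b.length : Int) ≤ pvPrefix B i ∧ pvPrefix B (i + 1) ≤ (vec_b.length : Int)
instance (vec_b : List Int) (B : List Int) : Decidable (Pre_vec_bin2multi vec_b B) := by
  unfold Pre_vec_bin2multi; infer_instance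

def pvWitness_vec_bin2multi : List Int × List Int := ([1, 0, 1], [2, 3])

def Spec_vec_bin2multi (vec_b : List Int) (B : List Int) (out : Option (List Int)) : Prop := out = vec_bin2multi_alt vec_b B
instance (vec_b : List Int) (B : List Int) (out : Option (List Int)) : Decidable (Spec_vec_bin2multi vec_b B out) := by unfold Spec_vec_bin2multi; infer_instance

-- ===== CLAIM (what is proved, stated in full; the proofs are below) =====
def Claim_equal_vec_bin2multi : Prop := ∀ (vec_b : List Int) (B : List Int), Dom_vec_bin2multi vec_b B → Pre_vec_bin2multi vec_b B → Spec_vec_bin2multi vec_b B (vec_bin2multi vec_b B)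

-- ===== LEMMAS AND PROOFS =====

-- proof-only helpers
def pvConv (Bs : List Int) (c : Int) : List Int :=
  match Bs with
  | [] => []
  | b :: rest => (c + b - 1) :: pvConv rest (c + b - 1)

def pvFA : List Bool → Int → Bool → Option (Int × Bool)
  | [], v, f => some (v, f)
  | x :: r, v, f =>
    if x then (if f then none else pvFA r (v + 1) f) else pvFA r v true

def pvHas10 : List Bool → Bool
  | a :: b :: r => (a && !b) || pvHas10 (b :: r)
  | _ => false

def pvHas01 : List Bool → Bool
  | a :: b :: r => (!a && b) || pvHas01 (b :: r)
  | _ => false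

theorem pvConvLoop_eq (Bs : List Int) (acc : List Int) (c : Int) :
    pvConvLoop Bs acc c = acc ++ pvConv Bs c := by
  induction Bs generalizing acc c with
  | nil => simp [pvConvLoop, pvConv]
  | cons b rest ih => simp [pvConvLoop, pvConv, ih]

theorem pvConv_getD (Bs : List Int) (c : Int) (i : Nat) (h : i ≤ Bs.length) :
    (c :: pvConv Bs c).getD i 0 = c + pvPrefix Bs i := by
  induction Bs generalizing c i with
  | nil =>
    have : i = 0 := by simpa using h
    subst this; simp [pvConv, pvPrefix]
  | cons b rest ih =>
    cases i with
    | zero => simp [pvPrefix]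
    | succ i =>
      simp only [pvConv, List.getD_cons_succ]
      rw [ih (c + b - 1) i (by simpa using h)]
      simp [pvPrefix, List.take_succ_cons]
      ring

theorem pvPrefix_succ (Bs : List Int) (i : Nat) (h : i < Bs.length) :
    pvPrefix Bs (i + 1) = pvPrefix Bs i + (Bs.getD i 0 - 1) := by
  induction Bs generalizing i with
  | nil => simp at h
  | cons b rest ih =>
    cases i with
    | zero => simp [pvPrefix, List.take_succ_cons]
    | succ i =>
      simp only [pvPrefix, List.take_succ_cons, List.map_cons, List.sum_cons, List.getD_cons_succ]
      have := ih i (by simpa using h)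
      simp only [pvPrefix] at this
      omega

theorem pvFA_true (M : List Bool) (v : Int) :
    pvFA M v true = if M.any id then none else some (v, true) := by
  induction M generalizing v with
  | nil => simp [pvFA]
  | cons x r ih => cases x <;> simp [pvFA, ih]

theorem pvHas01_false_cons (r : List Bool) : pvHas01 (false :: r) = r.any id := by
  induction r with
  | nil => simp [pvHas01]
  | cons b t ih =>
    cases b with
    | false => simpa [pvHas01] using ih
    | true => simp [pvHas01]

theorem pvFA_char (M : List Bool) (v : Int) :
    pvFA M v false = if pvHas01 M then none else some (v + (M.count true : Int), M.any (fun x => !x)) := by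
  induction M generalizing v with
  | nil => simp [pvFA, pvHas01]
  | cons x r ih =>
    cases x with
    | true =>
      have h01 : pvHas01 (true :: r) = pvHas01 r := by cases r <;> simp [pvHas01]
      rw [show pvFA (true :: r) v false = pvFA r (v + 1) false from rfl, ih, h01]
      by_cases h : pvHas01 r = true
      · simp [h]
      · simp [h, List.count_cons]
        push_cast; ring
    | false =>
      rw [show pvFA (false :: r) v false = pvFA r v true from rfl, pvFA_true, pvHas01_false_cons]
      by_cases h : r.any id = true
      · simp [h]
      · have hc : r.count true = 0 := by
          simp only [List.any_eq_true, id] at h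
          push_neg at h
          simpa [List.count_eq_zero] using h
        simp [h, List.count_cons, hc]

theorem pvHas01_append_singleton (M : List Bool) (x : Bool) :
    pvHas01 (M ++ [x]) = (pvHas01 M || (!(M.getLast?.getD true) && x)) := by
  induction M with
  | nil => simp [pvHas01]
  | cons a t ih =>
    cases t with
    | nil => cases a <;> cases x <;> simp [pvHas01]
    | cons b t' =>
      simp only [List.cons_append] at ih ⊢
      have h1 : pvHas01 (a :: b :: (t' ++ [x])) = ((!a && b) || pvHas01 (b :: (t' ++ [x]))) := rfl
      have h2 : pvHas01 (a :: b :: t') = ((!a && b) || pvHas01 (b :: t')) := rfl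
      rw [h1, ih, h2, List.getLast?_cons_cons, Bool.or_assoc]

theorem pvHas10_reverse (L : List Bool) : pvHas01 L.reverse = pvHas10 L := by
  induction L with
  | nil => rfl
  | cons a r ih =>
    rw [List.reverse_cons, pvHas01_append_singleton, ih]
    cases r with
    | nil => cases a <;> simp [pvHas10]
    | cons b t =>
      have hl : ((b :: t).reverse).getLast?.getD true = b := by
        simp [List.getLast?_reverse]
      rw [hl]
      cases a <;> simp [pvHas10, Bool.or_comm]

def pvBools (vec_b : List Int) (c0 : Int) (m : Nat) : List Bool :=
  (List.range m).map (fun j : Nat => decide (0 < (PySem.List.pyGet? vec_b (c0 + (j : Int))).getD 0))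

theorem pvFA_cons (x : Bool) (r : List Bool) (v : Int) (f : Bool) :
    pvFA (x :: r) v f = if x then (if f then none else pvFA r (v + 1) f) else pvFA r v true := rfl

theorem pvBools_succ (vec_b : List Int) (c0 : Int) (m : Nat) :
    pvBools vec_b c0 (m + 1)
      = pvBools vec_b c0 m ++ [decide (0 < (PySem.List.pyGet? vec_b (c0 + (m : Int))).getD 0)] := by
  simp [pvBools, List.range_succ]

theorem pvInnerA_eq (vec_b : List Int) (c0 c1 : Int) (n : Nat) (hn : c1 = c0 + n)
    (hin : ∀ j : Nat, j < n → (PySem.List.pyGet? vec_b (c0 + (j : Int))).isSome) :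
    ∀ (m : Nat), m ≤ n → ∀ (v : Int) (f : Bool),
      pvInnerA vec_b c0 c1 (PySem.List.pyRange (c1 - m) c1 1) v f =
      pvFA (pvBools vec_b c0 m).reverse v f := by
  intro m
  induction m with
  | zero => intro _ v f; simp [PySem.List.pyRange_one_eq_nil, pvInnerA, pvBools, pvFA]
  | succ m ih =>
    intro hm v f
    have hcons : PySem.List.pyRange (c1 - (m + 1 : Nat)) c1 1
        = (c1 - (m + 1 : Nat)) :: PySem.List.pyRange (c1 - (m + 1 : Nat) + 1) c1 1 :=
      PySem.List.pyRange_one_cons (by push_cast; omega)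
    have hshift : c1 - ((m + 1 : Nat) : Int) + 1 = c1 - (m : Nat) := by push_cast; omega
    have hidx : c1 - (c1 - ((m + 1 : Nat) : Int)) - 1 + c0 = c0 + (m : Nat) := by push_cast; omega
    obtain ⟨val, hval⟩ := Option.isSome_iff_exists.mp (hin m (by omega))
    have hrev : (pvBools vec_b c0 (m + 1)).reverse
        = decide (0 < val) :: (pvBools vec_b c0 m).reverse := by
      rw [pvBools_succ, List.reverse_append, hval]
      rfl
    rw [hcons]
    simp only [pvInnerA, hidx, hval]
    rw [hrev, pvFA_cons]
    by_cases hv : val > 0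
    · rw [if_pos hv, decide_eq_true hv, if_pos rfl]
      cases f with
      | true => rw [if_pos rfl, if_pos rfl]
      | false =>
        rw [if_neg Bool.false_ne_true, if_neg Bool.false_ne_true, hshift, ih (by omega)]
    · rw [if_neg hv, decide_eq_false hv, if_neg Bool.false_ne_true, hshift, ih (by omega)]

theorem pvBits_eq (vec_b : List Int) (pos : Int) (n : Nat)
    (hin : ∀ j : Nat, j < n → (PySem.List.pyGet? vec_b (pos + (j : Int))).isSome) :
    pvBits vec_b pos (PySem.List.pyRange 0 (n : Int) 1) =
      some ((pvBools vec_b pos n).map (fun x => if x then (1 : Int) else 0)) := by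
  induction n with
  | zero => simp [PySem.List.pyRange_one_eq_nil, pvBits, pvBools]
  | succ n ih =>
    have hsplit : PySem.List.pyRange 0 ((n + 1 : Nat) : Int) 1
        = PySem.List.pyRange 0 (n : Int) 1 ++ [(n : Int)] := by
      have := PySem.List.pyRange_one_succ_right (a := 0) (b := (n : Int)) (by positivity)
      push_cast
      simpa using this
    have happ : ∀ xs ys, pvBits vec_b pos (xs ++ ys) =
        match pvBits vec_b pos xs, pvBits vec_b pos ys with
        | some a, some b => some (a ++ b)
        | _, _ => none := by
      intro xs ys
      induction xs with
      | nil => simp [pvBits]; cases pvBits vec_b pos ys <;> rfl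
      | cons j rest ihx =>
        simp only [List.cons_append, pvBits]
        cases PySem.List.pyGet? vec_b (pos + j) with
        | none => rfl
        | some v =>
          simp only [ihx]
          cases pvBits vec_b pos rest <;> cases pvBits vec_b pos ys <;> simp
    rw [hsplit, happ]
    rw [ih (fun j hj => hin j (by omega))]
    obtain ⟨val, hval⟩ := Option.isSome_iff_exists.mp (hin n (by omega))
    simp only [pvBits, hval, pvBools_succ, List.map_append, Option.getD_some,
      List.map_cons, List.map_nil]
    by_cases hv : 0 < val
    · simp [hv]
    · simp [hv]

theorem pvDrop10_eq (L : List Bool) :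
    pvDrop10 (L.map (fun x => if x then (1 : Int) else 0)) = pvHas10 L := by
  induction L with
  | nil => rfl
  | cons a r ih =>
    cases r with
    | nil => cases a <;> rfl
    | cons b t =>
      have h1 : pvDrop10 ((a :: b :: t).map (fun x => if x then (1 : Int) else 0))
          = (decide ((if a then (1:Int) else 0) > (if b then (1:Int) else 0))
            || pvDrop10 ((b :: t).map (fun x => if x then (1 : Int) else 0))) := rfl
      rw [h1, ih]
      cases a <;> cases b <;> simp [pvHas10]

theorem pvSum_bits (L : List Bool) :
    (L.map (fun x => if x then (1 : Int) else 0)).sum = (L.count true : Int) := by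
  induction L with
  | nil => simp
  | cons a r ih => cases a <;> simp [List.count_cons, ih] <;> push_cast <;> ring

theorem pvOuter_eq (vec_b B : List Int) (pre : Pre_vec_bin2multi vec_b B) :
    ∀ (bs : List Int) (k : Nat) (acc : List Int), bs = B.drop k →
      pvOuterA vec_b (pvConvLoop B [0] 0) (List.range' k bs.length) acc
        = pvOuterB vec_b bs (pvPrefix B k) acc := by
  intro bs
  induction bs with
  | nil => intro k acc _; simp [pvOuterA, pvOuterB]
  | cons base rest ih =>
    intro k acc hdrop
    have hk : k < B.length := by
      by_contra h
      rw [List.drop_eq_nil_of_le (by omega)] at hdrop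
      exact List.cons_ne_nil _ _ hdrop
    have hbase : B.getD k 0 = base := by
      have h0 : (B.drop k)[0]? = some base := by rw [← hdrop]; rfl
      rw [List.getElem?_drop, Nat.add_zero] at h0
      simp [List.getD_eq_getElem?_getD, h0]
    have hconv : pvConvLoop B [0] 0 = 0 :: pvConv B 0 := by
      rw [pvConvLoop_eq]; rfl
    have hc0 : (pvConvLoop B [0] 0).getD k 0 = pvPrefix B k := by
      rw [hconv, pvConv_getD B 0 k (by omega)]; ring
    have hc1 : (pvConvLoop B [0] 0).getD (k + 1) 0 = pvPrefix B (k + 1) := by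
      rw [hconv, pvConv_getD B 0 (k + 1) (by omega)]; ring
    have hdrop' : rest = B.drop (k + 1) := by
      have h2 : B.drop (k + 1) = (B.drop k).drop 1 := by
        rw [List.drop_drop, Nat.add_comm]
      rw [h2, ← hdrop, List.drop_one, List.tail_cons]
    have hpos : pvPrefix B (k + 1) = pvPrefix B k + (base - 1) := by
      rw [pvPrefix_succ B k hk, hbase]
    have hrange : List.range' k (base :: rest).length = k :: List.range' (k + 1) rest.length := by
      simp [List.range'_succ]
    set c0 := pvPrefix B k with hc0def
    rw [hrange]
    simp only [pvOuterA, pvOuterB, hc0, hc1, hpos]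
    by_cases hb : 2 ≤ base
    case neg =>
      -- empty group: c0 + (base-1) ≤ c0 and base - 1 ≤ 0
      have h1 : PySem.List.pyRange c0 (c0 + (base - 1)) 1 = [] :=
        PySem.List.pyRange_one_eq_nil (by omega)
      have h2 : PySem.List.pyRange 0 (base - 1) 1 = [] :=
        PySem.List.pyRange_one_eq_nil (by omega)
      rw [h1, h2]
      simp only [pvInnerA, pvBits, pvDrop10]
      have hrec := ih (k + 1) (acc ++ [0]) hdrop'
      rw [hpos] at hrec
      simpa using hrec
    case pos =>
      have hn : base - 1 = ((base - 1).toNat : Int) := by omega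
      set n : Nat := (base - 1).toNat with hndef
      have hrg := pre k hk (by omega)
      have hin : ∀ j : Nat, j < n → (PySem.List.pyGet? vec_b (c0 + (j : Int))).isSome := by
        intro j hj
        rw [Option.isSome_iff_ne_none]
        intro hnone
        rw [PySem.List.pyGet?_eq_none_iff] at hnone
        apply hnone
        constructor
        · omega
        · have : pvPrefix B (k + 1) ≤ (vec_b.length : Int) := hrg.2
          rw [hpos] at this
          omega
      have hA := pvInnerA_eq vec_b c0 (c0 + (base - 1)) n (by omega) hin n (le_refl n) 0 false
      have hmE : c0 + (base - 1) - (n : Int) = c0 := by omega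
      rw [hmE] at hA
      rw [hA]
      rw [show ((base - 1 : Int)) = ((n : Nat) : Int) from by omega]
      rw [pvBits_eq vec_b c0 n hin]
      set L : List Bool := pvBools vec_b c0 n with hL
      rw [pvFA_char, pvHas10_reverse]
      by_cases h10 : pvHas10 L = true
      · simp [h10, pvDrop10_eq]
      · have hrec := ih (k + 1) (acc ++ [(L.count true : Int)]) hdrop'
        rw [hpos, hn] at hrec
        simp [h10, pvDrop10_eq, pvSum_bits, List.count_reverse]
        exact hrec

-- ===== VERDICT (by name: the statement is the Claim_ definition above) =====
theorem vec_bin2multi_spec : Claim_equal_vec_bin2multi := by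
  intro vec_b B _ pre
  unfold Spec_vec_bin2multi vec_bin2multi vec_bin2multi_alt
  have := pvOuter_eq vec_b B pre B 0 [] rfl
  simpa [List.range_eq_range', pvPrefix] using this
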